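-- pv_equiv track=rewrite | github.com/noppakorn/COM-PROG | Homework/Prog-08/6330258021.py | countandwords
-- ===== SOURCE A (Python) =====
-- def countandwords(lines) :
--     cc,ca,s = 0,0,''
--     for line in lines :
--         cc += len(line)
--         for c in line :
--             if c.isalnum() :
--                 s += c
--                 ca += 1
--             else : s += ' '
--     return cc,ca,s.split()
-- ===== SOURCE B (Python) =====
-- def countandwords(lines):
--     text = ''.join(lines)
--     words = []
--     cur = []
--     for c in text:
--         if c.isalnum():
--             cur.append(c)
--         elif cur:
--             words.append(''.join(cur))
--             cur = []
--     if cur: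
--         words.append(''.join(cur))
--     return len(text), sum(map(len, words)), words
-- ===== Notes on version B (the rewrite author's own statement) =====
-- stated objective: faster
-- what changed: B is a single-pass state machine over the joined text that emits each maximal alnum run directly from a character buffer, with no normalized string built by += and no split(); the char count and alnum count are derived afterwards (len(text) and sum of word lengths) instead of being maintained inside the loop.
import Mathlib
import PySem

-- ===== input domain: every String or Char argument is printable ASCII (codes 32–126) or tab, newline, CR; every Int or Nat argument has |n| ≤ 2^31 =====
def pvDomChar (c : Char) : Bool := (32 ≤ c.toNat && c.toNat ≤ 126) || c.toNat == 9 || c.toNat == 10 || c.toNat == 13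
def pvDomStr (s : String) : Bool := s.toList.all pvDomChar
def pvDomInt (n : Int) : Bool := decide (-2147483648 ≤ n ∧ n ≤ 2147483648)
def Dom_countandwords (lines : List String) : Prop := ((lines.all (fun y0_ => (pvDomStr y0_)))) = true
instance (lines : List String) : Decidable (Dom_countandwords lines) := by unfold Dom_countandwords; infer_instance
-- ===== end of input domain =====

-- B is a single-pass state machine over the joined text that emits each maximal alnum run
-- directly from a character buffer (no normalized string, no split()); cc and ca are derived
-- afterwards as len(text) and the sum of the word lengths.

-- ===== PORT A =====
-- A's inner loop body: one character of a line
def pvStepC (st : Int × Int × List Char) (c : Char) : Int × Int × List Char :=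
  if PySem.Chars.isalnum c then (st.1, st.2.1 + 1, st.2.2 ++ [c])
  else (st.1, st.2.1, st.2.2 ++ [' '])

-- A's outer loop body: one line ('cc += len(line)' then the char loop)
def pvStepL (st : Int × Int × List Char) (line : String) : Int × Int × List Char :=
  line.toList.foldl pvStepC (st.1 + PySem.Str.len line, st.2.1, st.2.2)

def countandwords (lines : List String) : Int × Int × List String :=
  let r := lines.foldl pvStepL (0, 0, [])
  (r.1, r.2.1, (PySem.Chars.split₀ r.2.2).map String.ofList)

-- ===== PORT B =====
-- B's loop body: append an alnum char to the buffer, flush the buffer on anything else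
def pvStepB (st : List (List Char) × List Char) (c : Char) : List (List Char) × List Char :=
  if PySem.Chars.isalnum c then (st.1, st.2 ++ [c])
  else if st.2.isEmpty then st
  else (st.1 ++ [st.2], [])

def countandwords_alt (lines : List String) : Int × Int × List String :=
  let text := (lines.map String.toList).flatten
  let st := text.foldl pvStepB ([], [])
  let words := if st.2.isEmpty then st.1 else st.1 ++ [st.2]
  ((text.length : Int), (((words.map List.length).sum : Nat) : Int), words.map String.ofList)

-- ===== PRECONDITION & SPEC =====
def Spec_countandwords (lines : List String) (out : Int × Int × List String) : Prop := out = countandwords_alt lines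
instance (lines : List String) (out : Int × Int × List String) : Decidable (Spec_countandwords lines out) := by unfold Spec_countandwords; infer_instance

-- ===== CLAIM (what is proved, stated in full; the proofs are below) =====
def Claim_equal_countandwords : Prop := ∀ (lines : List String), Dom_countandwords lines → Spec_countandwords lines (countandwords lines)

-- ===== LEMMAS AND PROOFS =====

-- the normalization A applies character by character
def pvNorm (c : Char) : Char := if PySem.Chars.isalnum c then c else ' '

-- an alphanumeric character is never whitespace
lemma pvIsalnum_not_isspace (c : Char) (h : PySem.Chars.isalnum c = true) :
    PySem.Chars.isspace c = false := by
  simp only [PySem.Chars.isalnum, PySem.Chars.isalpha, PySem.Chars.isdigit,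
    PySem.Chars.isupper, PySem.Chars.islower, PySem.Chars.isspace, Char.le_def,
    Bool.or_eq_true, Bool.and_eq_true, decide_eq_true_eq,
    Bool.or_eq_false_iff, Bool.and_eq_false_iff, decide_eq_false_iff_not,
    Char.toNat, UInt32.le_iff_toNat_le,
    show 'A'.val.toNat = 65 from rfl, show 'Z'.val.toNat = 90 from rfl,
    show 'a'.val.toNat = 97 from rfl, show 'z'.val.toNat = 122 from rfl,
    show '0'.val.toNat = 48 from rfl, show '9'.val.toNat = 57 from rfl] at h ⊢
  omega

lemma pvIsspace_norm (c : Char) :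
    PySem.Chars.isspace (pvNorm c) = !PySem.Chars.isalnum c := by
  unfold pvNorm
  by_cases h : PySem.Chars.isalnum c = true
  · simp [h, pvIsalnum_not_isspace c h]
  · simp at h
    simp [h]
    decide

-- A's inner loop over the characters of one line
lemma pvInner (cs : List Char) (cc ca : Int) (s : List Char) :
    cs.foldl pvStepC (cc, ca, s)
      = (cc, ca + (cs.countP PySem.Chars.isalnum : Int), s ++ cs.map pvNorm) := by
  induction cs generalizing ca s with
  | nil => simp
  | cons c cs ih =>
    by_cases h : PySem.Chars.isalnum c = true
    · simp [List.foldl_cons, pvStepC, h, ih, pvNorm, List.countP_cons]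
      omega
    · simp at h
      simp [List.foldl_cons, pvStepC, h, ih, pvNorm, List.countP_cons, List.append_assoc]

-- A's outer loop
lemma pvOuter (lines : List String) (cc ca : Int) (s : List Char) :
    lines.foldl pvStepL (cc, ca, s)
      = (cc + (((lines.map String.toList).flatten).length : Int),
         ca + (((lines.map String.toList).flatten).countP PySem.Chars.isalnum : Int),
         s ++ ((lines.map String.toList).flatten).map pvNorm) := by
  induction lines generalizing cc ca s with
  | cons line rest ih =>
    rw [List.foldl_cons, pvStepL, pvInner, ih]
    simp only [Prod.mk.injEq, List.map_cons, List.flatten_cons, List.length_append,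
      List.countP_append, List.map_append, PySem.Str.len_eq]
    refine ⟨by push_cast; ring, by push_cast; ring, by simp [List.append_assoc]⟩
  | nil => simp

-- B's machine over cs, then a final flush, equals A's split of the normalized characters
lemma pvMachine (cs : List Char) (ws : List (List Char)) (cur : List Char) :
    (let st := cs.foldl pvStepB (ws, cur)
     if st.2.isEmpty then st.1 else st.1 ++ [st.2])
      = PySem.Chars.split₀.go (cs.map pvNorm) cur.reverse ws.reverse := by
  induction cs generalizing ws cur with
  | nil =>
    simp only [List.foldl_nil, List.map_nil]
    rw [PySem.Chars.split₀.go]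
    by_cases h : cur = []
    · subst h; simp
    · have hce : cur.isEmpty = false := by simp [List.isEmpty_iff, h]
      simp [hce]
  | cons c rest ih =>
    simp only [List.map_cons, List.foldl_cons]
    by_cases h : PySem.Chars.isalnum c = true
    · rw [PySem.Chars.split₀.go]
      have hs : PySem.Chars.isspace (pvNorm c) = false := by simp [pvIsspace_norm, h]
      simp only [pvStepB, h, if_true, hs, Bool.false_eq_true, if_false]
      have e : pvNorm c :: cur.reverse = (cur ++ [c]).reverse := by simp [pvNorm, h]
      rw [e]; exact ih ws (cur ++ [c])
    · rw [PySem.Chars.split₀.go]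
      have hs : PySem.Chars.isspace (pvNorm c) = true := by simp [pvIsspace_norm, h]
      simp only [pvStepB, h, Bool.false_eq_true, if_false, hs, if_true]
      by_cases hc : cur = []
      · subst hc
        simp only [List.isEmpty_nil, if_true, List.reverse_nil]
        exact ih ws []
      · have hce : cur.isEmpty = false := by simp [List.isEmpty_iff, hc]
        simp only [hce, Bool.false_eq_true, if_false, List.isEmpty_reverse]
        have e : cur.reverse.reverse :: ws.reverse = (ws ++ [cur]).reverse := by simp
        rw [e]
        simpa using ih (ws ++ [cur]) []

-- total word length after split() = number of non-whitespace characters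
lemma pvGoSum (s cur : List Char) (acc : List (List Char)) :
    ((PySem.Chars.split₀.go s cur acc).map List.length).sum
      = (acc.map List.length).sum + cur.length + s.countP (fun c => !PySem.Chars.isspace c) := by
  induction s generalizing cur acc with
  | nil =>
    rw [PySem.Chars.split₀.go]
    by_cases h : cur.isEmpty = true
    · simp [List.isEmpty_iff.mp h]
    · simp [h]
  | cons c rest ih =>
    rw [PySem.Chars.split₀.go]
    by_cases h : PySem.Chars.isspace c = true
    · by_cases hc : cur.isEmpty = true
      · simp [h, ih, List.countP_cons, List.isEmpty_iff.mp hc]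
      · simp [h, hc, ih, List.countP_cons]
        omega
    · simp at h
      simp [h, ih, List.countP_cons]
      omega

-- ===== VERDICT (by name: the statement is the Claim_ definition above) =====
theorem countandwords_spec : Claim_equal_countandwords := by
  intro lines _
  unfold Spec_countandwords countandwords countandwords_alt
  have hmach := pvMachine ((lines.map String.toList).flatten) [] []
  simp only [List.reverse_nil] at hmach
  have h2 : ((lines.map String.toList).flatten).countP PySem.Chars.isalnum
      = ((PySem.Chars.split₀.go (((lines.map String.toList).flatten).map pvNorm) [] []).map
          List.length).sum := by
    rw [pvGoSum]
    simp only [List.map_nil, List.sum_nil, List.length_nil, Nat.zero_add, List.countP_map]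
    apply List.countP_congr
    intro c _
    simp [Function.comp, pvIsspace_norm]
  simp only [pvOuter, zero_add, PySem.Chars.split₀, List.nil_append]
  rw [hmach]
  simp only [Prod.mk.injEq]
  exact ⟨trivial, by exact_mod_cast h2, trivial⟩
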